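-- pv_equiv track=rewrite | github.com/bmesuere/eindejaarspuzzel-2018 | opgave14/derive.py | belArr
-- ===== SOURCE A (Python) =====
-- def belArr(b,i): # real
--     parts = list(map(int,str(i)));
--     ret = [b];
--     while ret[-1] < i:
--         for p in parts:
--             if ret[-1] < i:
--                 ret.append(ret[-1] + p)
--     return ret
-- ===== SOURCE B (Python) =====
-- def belArr(b, i):
--     parts = list(map(int, str(i)))
--     if b >= i:
--         return [b]
--     s = sum(parts)
--     pre = []
--     t = 0
--     for p in parts:
--         t += p
--         pre.append(t)
--     q = (i - b + s - 1) // s - 1  # number of complete digit cycles strictly below i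
--     ret = [b] + [b + c * s + x for c in range(q) for x in pre]
--     last = b + q * s
--     for x in pre:
--         ret.append(last + x)
--         if last + x >= i:
--             break
--     return ret
-- ===== Notes on version B (the rewrite author's own statement) =====
-- stated objective: alternative
-- what changed: Instead of repeatedly re-testing the guard while appending digit by digit, B computes the number q of complete digit cycles arithmetically by ceiling division ((i-b+s-1)//s - 1 with s the digit sum), materialises those q cycles in one bulk comprehension from the per-cycle prefix sums, and only walks the final partial cycle element by element.
import Mathlib
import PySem

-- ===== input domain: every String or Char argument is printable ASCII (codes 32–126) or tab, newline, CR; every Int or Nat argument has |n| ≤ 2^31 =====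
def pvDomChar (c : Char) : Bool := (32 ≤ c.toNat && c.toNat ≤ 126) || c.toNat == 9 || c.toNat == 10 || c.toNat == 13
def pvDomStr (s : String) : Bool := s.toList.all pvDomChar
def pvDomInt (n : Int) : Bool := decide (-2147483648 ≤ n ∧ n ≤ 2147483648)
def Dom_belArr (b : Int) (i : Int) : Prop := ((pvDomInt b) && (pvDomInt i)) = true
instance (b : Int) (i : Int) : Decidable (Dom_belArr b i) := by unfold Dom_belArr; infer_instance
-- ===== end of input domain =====

-- B replaces the nested while/for/if append loop by an arithmetic count of complete digit
-- cycles (ceiling division by the digit sum) plus bulk construction; objective: alternative.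

-- ===== PORT A =====

-- shared helper: `list(map(int, str(i)))` (both sources contain this exact line);
-- `none` = ValueError (e.g. the '-' character of a negative i)
def pyMapInt? : List Char → Option (List Int)
  | [] => some []
  | c :: cs =>
    match PySem.Int.ofChars? [c], pyMapInt? cs with
    | some v, some vs => some (v :: vs)
    | _, _ => none

def pyDigits (i : Int) : Option (List Int) := pyMapInt? (PySem.Int.toChars i)

-- inner `for p in parts: if ret[-1] < i: ret.append(ret[-1] + p)`;
-- returns (the appended values, the new last element)
def belArrCyc (i : Int) : List Int → Int → List Int × Int
  | [], last => ([], last)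
  | p :: ps, last =>
    if last < i then
      let r := belArrCyc i ps (last + p)
      ((last + p) :: r.1, r.2)
    else belArrCyc i ps last

-- needed by belArrLoop's termination proof (cited in decreasing_by)
theorem belArrCyc_snd (i : Int) (parts : List Int) (last : Int)
    (h : ∀ p ∈ parts, 0 ≤ p) :
    i ≤ (belArrCyc i parts last).2 ∨ (belArrCyc i parts last).2 = last + parts.sum := by
  induction parts generalizing last with
  | nil => simp [belArrCyc]
  | cons p ps ih =>
    have hp : 0 ≤ p := h p (by simp)
    have hps : ∀ q ∈ ps, 0 ≤ q := fun q hq => h q (by simp [hq])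
    have hsum : 0 ≤ ps.sum := List.sum_nonneg hps
    by_cases hl : last < i
    · rcases ih (last + p) hps with h1 | h1
      · left; simpa [belArrCyc, hl] using h1
      · right; simp [belArrCyc, hl, h1]; ring
    · rcases ih last hps with h1 | h1
      · left; simpa [belArrCyc, hl] using h1
      · left; simp [belArrCyc, hl, h1]; omega

-- outer `while ret[-1] < i:` loop; the extra conjuncts of the guard are a totality guard
-- (always true for a real digit list when the Python loop terminates)
def belArrLoop (i : Int) (parts : List Int) (last : Int) : List Int :=
  if h : last < i ∧ (∀ p ∈ parts, 0 ≤ p) ∧ 0 < parts.sum then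
    (belArrCyc i parts last).1 ++ belArrLoop i parts (belArrCyc i parts last).2
  else []
termination_by (i - last).toNat
decreasing_by
  rcases belArrCyc_snd i parts last h.2.1 with h1 | h1 <;> omega

def belArr (b : Int) (i : Int) : List Int :=
  match pyDigits i with
  | none => []            -- ValueError; excluded by Pre_belArr
  | some parts => b :: belArrLoop i parts b

-- ===== PORT B =====

-- the `pre` building loop of Source B (running prefix sums starting from t)
def preSums : List Int → Int → List Int
  | [], _ => []
  | p :: ps, t => (t + p) :: preSums ps (t + p)

-- the final `for x in pre: ret.append(last + x); if last + x >= i: break` loop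
def belArrTail (i last : Int) : List Int → List Int
  | [] => []
  | x :: xs => (last + x) :: (if i ≤ last + x then [] else belArrTail i last xs)

def belArr_alt (b : Int) (i : Int) : List Int :=
  match pyDigits i with
  | none => []            -- ValueError; excluded by Pre_belArr
  | some parts =>
    if i ≤ b then [b]
    else
      let s := parts.sum
      let pre := preSums parts 0
      let q := PySem.Int.floordiv (i - b + s - 1) s - 1
      b :: ((PySem.List.pyRange 0 q 1).flatMap (fun c => pre.map (fun x => b + c * s + x))
            ++ belArrTail i (b + q * s) pre)

-- ===== PRECONDITION & SPEC =====
-- Pre_ excludes exactly the inputs where A does not return: i < 0 (int('-…') raises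
-- ValueError) and i = 0 with b < 0 (the while loop adds the single digit 0 forever).
def Pre_belArr (b : Int) (i : Int) : Prop := 0 ≤ i ∧ (i = 0 → 0 ≤ b)
instance (b : Int) (i : Int) : Decidable (Pre_belArr b i) := by unfold Pre_belArr; infer_instance
def pvWitness_belArr : Int × Int := (0, 7)

def Spec_belArr (b : Int) (i : Int) (out : List Int) : Prop := out = belArr_alt b i
instance (b : Int) (i : Int) (out : List Int) : Decidable (Spec_belArr b i out) := by unfold Spec_belArr; infer_instance

-- ===== CLAIM (what is proved, stated in full; the proofs are below) =====
def Claim_equal_belArr : Prop := ∀ (b : Int) (i : Int), Dom_belArr b i → Pre_belArr b i → Spec_belArr b i (belArr b i)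

-- ===== LEMMAS AND PROOFS =====

-- proof-side helper: n complete cycles of appended values, cycle c starting at a + c*s
def fullB (parts : List Int) (s : Int) : Nat → Int → List Int
  | 0, _ => []
  | n + 1, a => preSums parts a ++ fullB parts s n (a + s)

theorem preSums_shift (ps : List Int) (t : Int) : ∀ u : Int,
    preSums ps (t + u) = (preSums ps u).map (t + ·) := by
  induction ps with
  | nil => intro u; simp [preSums]
  | cons p ps ih =>
    intro u
    simp only [preSums, List.map_cons]
    rw [show t + u + p = t + (u + p) by ring, ih (u + p)]

theorem preSums_map (ps : List Int) (t : Int) :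
    (preSums ps 0).map (t + ·) = preSums ps t := by
  have := preSums_shift ps t 0
  simpa using this.symm

theorem belArrCyc_done (i : Int) (parts : List Int) (last : Int) (h : i ≤ last) :
    belArrCyc i parts last = ([], last) := by
  induction parts with
  | nil => simp [belArrCyc]
  | cons p ps ih => simp [belArrCyc, not_lt.mpr h, ih]

theorem belArrCyc_full (i : Int) (parts : List Int) :
    ∀ last : Int, (∀ p ∈ parts, 0 ≤ p) → last + parts.sum < i →
    belArrCyc i parts last = (preSums parts last, last + parts.sum) := by
  induction parts with
  | nil => intro last _ _; simp [belArrCyc, preSums]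
  | cons p ps ih =>
    intro last h hlt
    have hp : 0 ≤ p := h p (by simp)
    have hps : ∀ q ∈ ps, 0 ≤ q := fun q hq => h q (by simp [hq])
    have hsum : 0 ≤ ps.sum := List.sum_nonneg hps
    have hli : last < i := by simp [List.sum_cons] at hlt; omega
    have hfull : (last + p) + ps.sum < i := by simp [List.sum_cons] at hlt; omega
    simp [belArrCyc, hli, ih (last + p) hps hfull, preSums, List.sum_cons]
    ring

theorem belArrCyc_tail (i : Int) (parts : List Int) :
    ∀ (t L : Int), (∀ p ∈ parts, 0 ≤ p) → L + t < i → i ≤ L + t + parts.sum →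
    (belArrCyc i parts (L + t)).1 = belArrTail i L (preSums parts t) ∧
      i ≤ (belArrCyc i parts (L + t)).2 := by
  induction parts with
  | nil => intro t L _ hlt hge; simp [List.sum_nil] at hge; omega
  | cons p ps ih =>
    intro t L h hlt hge
    have hps : ∀ q ∈ ps, 0 ≤ q := fun q hq => h q (by simp [hq])
    have ha : L + t + p = L + (t + p) := by ring
    by_cases hstop : i ≤ L + t + p
    · have hdone := belArrCyc_done i ps (L + (t + p)) (by omega)
      constructor
      · simp [belArrCyc, hlt, preSums, belArrTail, hdone, ha, (ha ▸ hstop : i ≤ L + (t + p))]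
      · simp [belArrCyc, hlt, ha, hdone]; omega
    · have hsum : i ≤ L + (t + p) + ps.sum := by simp [List.sum_cons] at hge; omega
      have hrec := ih (t + p) L hps (by omega) hsum
      constructor
      · simp only [belArrCyc, if_pos hlt, preSums, belArrTail,
          if_neg (not_le.mpr (by omega : L + (t + p) < i))]
        rw [ha, hrec.1]
      · simp only [belArrCyc, if_pos hlt]
        rw [ha]; exact hrec.2

theorem belArrLoop_eq (i : Int) (parts : List Int)
    (hnn : ∀ p ∈ parts, 0 ≤ p) (hs : 0 < parts.sum) :
    ∀ (n : Nat) (last : Int), last + n * parts.sum < i → i ≤ last + (n + 1) * parts.sum →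
    belArrLoop i parts last =
      fullB parts parts.sum n last ++ belArrTail i (last + n * parts.sum) (preSums parts 0) := by
  intro n
  induction n with
  | zero =>
    intro last h1 h2
    have h1' : last < i := by simpa using h1
    have h2' : i ≤ last + parts.sum := by push_cast at h2; linarith
    rw [belArrLoop, dif_pos ⟨h1', hnn, hs⟩]
    have htail := belArrCyc_tail i parts 0 last hnn (by simpa using h1') (by simpa using h2')
    simp only [add_zero] at htail
    rw [htail.1, belArrLoop, dif_neg (fun hC => absurd htail.2 (not_le.mpr hC.1))]
    simp [fullB]
  | succ n ih =>
    intro last h1 h2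
    have hc : ((n + 1 : Nat) : Int) = (n : Int) + 1 := by push_cast; ring
    have e1 : ((n : Int) + 1) * parts.sum = (n : Int) * parts.sum + parts.sum := by ring
    have e2 : ((n : Int) + 1 + 1) * parts.sum = parts.sum + ((n : Int) + 1) * parts.sum := by ring
    have hnn0 : (0:Int) ≤ (n : Int) * parts.sum := mul_nonneg (by positivity) (le_of_lt hs)
    rw [hc] at h1 h2
    have h1' : (last + parts.sum) + (n : Int) * parts.sum < i := by rw [e1] at h1; linarith
    have hfull : last + parts.sum < i := by linarith
    have hlast : last < i := by linarith
    have h2' : i ≤ (last + parts.sum) + ((n : Int) + 1) * parts.sum := by rw [e2] at h2; linarith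
    rw [belArrLoop, dif_pos ⟨hlast, hnn, hs⟩, belArrCyc_full i parts last hnn hfull]
    have ihh := ih (last + parts.sum) h1' h2'
    rw [ihh, fullB, List.append_assoc, hc]
    have e3 : last + parts.sum + (n : Int) * parts.sum = last + ((n : Int) + 1) * parts.sum := by ring
    rw [e3]

theorem flatMap_eq_fullB (parts : List Int) :
    ∀ (n : Nat) (a : Int),
    (PySem.List.pyRange 0 (n : Int) 1).flatMap
        (fun c => (preSums parts 0).map (fun x => a + c * parts.sum + x)) =
      fullB parts parts.sum n a := by
  intro n
  induction n with
  | zero => intro a; simp [PySem.List.pyRange_one_eq_nil, fullB]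
  | succ n ih =>
    intro a
    have hc : ((n + 1 : Nat) : Int) = (n : Int) + 1 := by push_cast; ring
    rw [hc, PySem.List.pyRange_one_cons (by positivity), List.flatMap_cons]
    have hhead : (preSums parts 0).map (fun x => a + 0 * parts.sum + x) = preSums parts a := by
      simpa using preSums_map parts a
    have hsh : PySem.List.pyRange (0 + 1) ((n : Int) + 1) 1
        = (PySem.List.pyRange 0 (n : Int) 1).map (· + 1) := by
      rw [PySem.List.pyRange_one, PySem.List.pyRange_one, List.map_map]
      have ht : ((n : Int) + 1 - (0 + 1)).toNat = ((n : Int) - 0).toNat := by omega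
      rw [ht]
      congr 1
      funext k
      simp [Function.comp]
      ring
    rw [hsh, List.flatMap_map]
    have hfun : (fun c => (preSums parts 0).map (fun x => a + (c + 1) * parts.sum + x))
        = (fun c => (preSums parts 0).map (fun x => (a + parts.sum) + c * parts.sum + x)) := by
      funext c
      congr 1
      funext x
      ring
    have hstep : fullB parts parts.sum (n + 1) a
        = preSums parts a ++ fullB parts parts.sum n (a + parts.sum) := rfl
    rw [hfun, ih (a + parts.sum), hstep, hhead]

theorem q_bounds (b i s : Int) (hs : 0 < s) (hbi : b < i) :
    0 ≤ PySem.Int.floordiv (i - b + s - 1) s - 1 ∧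
    b + (PySem.Int.floordiv (i - b + s - 1) s - 1) * s < i ∧
    i ≤ b + (PySem.Int.floordiv (i - b + s - 1) s - 1 + 1) * s := by
  rw [PySem.Int.floordiv_eq_ediv_of_pos hs]
  have hd := Int.ediv_add_emod (i - b + s - 1) s
  have hr1 := Int.emod_nonneg (i - b + s - 1) (ne_of_gt hs)
  have hr2 := Int.emod_lt_of_pos (i - b + s - 1) hs
  set d := (i - b + s - 1) / s with hdd
  set r := (i - b + s - 1) % s with hrr
  have e1 : (d - 1) * s = s * d - s := by ring
  have e2 : (d - 1 + 1) * s = s * d := by ring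
  refine ⟨?_, by omega, by omega⟩
  have h' : s * (-1) < s * (d - 1) := by nlinarith
  have := lt_of_mul_lt_mul_left h' (le_of_lt hs)
  omega

theorem toDigitsCore_mem (c : Char) :
    ∀ (f n : Nat) (ds : List Char), c ∈ Nat.toDigitsCore 10 f n ds →
      c ∈ ds ∨ ∃ k, k < 10 ∧ c = Nat.digitChar k := by
  intro f
  induction f with
  | zero => intro n ds h; left; simpa [Nat.toDigitsCore] using h
  | succ f ih =>
    intro n ds h
    simp only [Nat.toDigitsCore] at h
    by_cases h10 : n / 10 = 0
    · simp [h10] at h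
      rcases h with h | h
      · right; exact ⟨n % 10, Nat.mod_lt _ (by norm_num), h⟩
      · left; exact h
    · simp [h10] at h
      rcases ih (n / 10) ((n % 10).digitChar :: ds) h with h | h
      · rcases List.mem_cons.mp h with h | h
        · right; exact ⟨n % 10, Nat.mod_lt _ (by norm_num), h⟩
        · left; exact h
      · right; exact h

theorem toDigitsCore_ne_zero :
    ∀ (f n : Nat) (ds : List Char), 0 < n → n ≤ f →
      ∃ c ∈ Nat.toDigitsCore 10 f n ds, c ≠ '0' := by
  intro f
  induction f with
  | zero => intro n ds h1 h2; omega
  | succ f ih =>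
    intro n ds h1 h2
    simp only [Nat.toDigitsCore]
    by_cases h10 : n / 10 = 0
    · have hlt : n < 10 := by omega
      have hmod : n % 10 = n := Nat.mod_eq_of_lt hlt
      refine ⟨(n % 10).digitChar, by simp [h10], ?_⟩
      rw [hmod]
      interval_cases n <;> decide
    · have hpos : 0 < n / 10 := Nat.pos_of_ne_zero h10
      have hle : n / 10 ≤ f := by
        have := Nat.div_lt_self h1 (by norm_num : 1 < 10)
        omega
      obtain ⟨c, hc, hcne⟩ := ih (n / 10) ((n % 10).digitChar :: ds) hpos hle
      exact ⟨c, by simp [h10, hc], hcne⟩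

theorem digitChar_parse (k : Nat) (hk : k < 10) :
    PySem.Int.ofChars? [Nat.digitChar k] = some (k : Int) := by
  interval_cases k <;> decide

theorem pyMapInt_digits :
    ∀ cs : List Char, (∀ c ∈ cs, ∃ k, k < 10 ∧ c = Nat.digitChar k) →
    ∃ parts : List Int, pyMapInt? cs = some parts ∧ (∀ p ∈ parts, 0 ≤ p) ∧
      ((∃ c ∈ cs, c ≠ '0') → 0 < parts.sum) := by
  intro cs
  induction cs with
  | nil => intro _; exact ⟨[], rfl, by simp, by simp⟩
  | cons c cs ih =>
    intro h
    obtain ⟨k, hk, rfl⟩ := h c (by simp)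
    obtain ⟨parts, hp, hnn, hsum⟩ := ih (fun c' hc' => h c' (by simp [hc']))
    have hps : 0 ≤ parts.sum := List.sum_nonneg hnn
    refine ⟨(k : Int) :: parts, ?_, ?_, ?_⟩
    · simp [pyMapInt?, digitChar_parse k hk, hp]
    · intro p hp'
      rcases List.mem_cons.mp hp' with rfl | hp''
      · positivity
      · exact hnn p hp''
    · rintro ⟨c0, hc0, hne⟩
      rcases List.mem_cons.mp hc0 with rfl | hc0'
      · have hk0 : k ≠ 0 := by rintro rfl; exact hne (by decide)
        have h1 : (1 : Int) ≤ (k : Int) := by exact_mod_cast Nat.one_le_iff_ne_zero.mpr hk0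
        simp only [List.sum_cons]
        linarith
      · have h1 := hsum ⟨c0, hc0', hne⟩
        have h0 : (0 : Int) ≤ (k : Int) := by positivity
        simp only [List.sum_cons]
        linarith

theorem pyDigits_pos (i : Int) (hi : 0 < i) :
    ∃ parts, pyDigits i = some parts ∧ (∀ p ∈ parts, 0 ≤ p) ∧ 0 < parts.sum := by
  have hni : ¬ i < 0 := by omega
  have hchars : PySem.Int.toChars i = Nat.toDigitsCore 10 (i.toNat + 1) i.toNat [] := by
    simp [PySem.Int.toChars, hni, Nat.toDigits]
  have hall : ∀ c ∈ Nat.toDigitsCore 10 (i.toNat + 1) i.toNat [], ∃ k, k < 10 ∧ c = Nat.digitChar k := by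
    intro c hc
    rcases toDigitsCore_mem c (i.toNat + 1) i.toNat [] hc with h | h
    · simp at h
    · exact h
  obtain ⟨c0, hc0, hne⟩ := toDigitsCore_ne_zero (i.toNat + 1) i.toNat [] (by omega) (by omega)
  obtain ⟨parts, hp, hnn, hsum⟩ := pyMapInt_digits _ hall
  refine ⟨parts, ?_, hnn, hsum ⟨c0, hc0, hne⟩⟩
  unfold pyDigits
  rw [hchars]
  exact hp

-- ===== VERDICT (by name: the statement is the Claim_ definition above) =====
theorem belArr_spec : Claim_equal_belArr := by
  intro b i hdom hpre
  unfold Spec_belArr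
  by_cases hbi : i ≤ b
  · cases hd : pyDigits i with
    | none => simp only [belArr, belArr_alt, hd]
    | some parts =>
      simp only [belArr, belArr_alt, hd, if_pos hbi]
      rw [belArrLoop, dif_neg (fun hC => absurd hC.1 (not_lt.mpr hbi))]
  · have hbi' : b < i := not_le.mp hbi
    have hi : 0 < i := by
      rcases hpre with ⟨h0, hz⟩
      by_cases h : i = 0
      · have := hz h; omega
      · omega
    obtain ⟨parts, hd, hnn, hs⟩ := pyDigits_pos i hi
    simp only [belArr, belArr_alt, hd, if_neg hbi]
    set s := parts.sum with hss
    set q := PySem.Int.floordiv (i - b + s - 1) s - 1 with hqq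
    obtain ⟨hq0, hql, hqr⟩ := q_bounds b i s hs hbi'
    have hqt : ((q.toNat : Nat) : Int) = q := Int.toNat_of_nonneg hq0
    have hl := belArrLoop_eq i parts hnn hs q.toNat b (by rw [hqt]; exact hql) (by rw [hqt]; exact hqr)
    rw [hl, ← hqt, flatMap_eq_fullB]
    simp [hss]
    rw [max_eq_left hq0]
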